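-- pv_equiv track=rewrite | github.com/LittleHenderson/tootra-tks | training/datasets.py | assign_foundation
-- ===== SOURCE A (Python) =====
-- from typing import Dict, List, Optional, Any, Union
--
-- FOUNDATIONS = {
--     1: {"name": "Unity", "noetics": [10]},
--     2: {"name": "Wisdom", "noetics": [1, 4, 6, 7]},
--     3: {"name": "Life", "noetics": [4]},
--     4: {"name": "Companionship", "noetics": [2, 5]},
--     5: {"name": "Power", "noetics": [6, 8]},
--     6: {"name": "Material", "noetics": [10, 4, 9]},
--     7: {"name": "Lust", "noetics": [5, 6, 7]},
-- }
--
-- def assign_foundation(noetics: List[int]) -> int: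
--     """
--     Assign foundation based on noetic overlap.
--
--     Args:
--         noetics: List of noetic indices
--
--     Returns:
--         Foundation index (1-7)
--     """
--     best_f = 1
--     best_overlap = 0
--
--     for f_idx, f_info in FOUNDATIONS.items():
--         overlap = len(set(noetics) & set(f_info["noetics"]))
--         if overlap > best_overlap:
--             best_overlap = overlap
--             best_f = f_idx
--
--     return best_f
-- ===== SOURCE B (Python) =====
-- FOUNDATIONS = {
--     1: {"name": "Unity", "noetics": [10]},
--     2: {"name": "Wisdom", "noetics": [1, 4, 6, 7]},
--     3: {"name": "Life", "noetics": [4]},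
--     4: {"name": "Companionship", "noetics": [2, 5]},
--     5: {"name": "Power", "noetics": [6, 8]},
--     6: {"name": "Material", "noetics": [10, 4, 9]},
--     7: {"name": "Lust", "noetics": [5, 6, 7]},
-- }
--
-- # Inverted index built once: noetic value -> list of foundation indices containing it.
-- _INDEX = {}
-- for _f_idx, _f_info in FOUNDATIONS.items():
--     for _v in _f_info["noetics"]:
--         _INDEX.setdefault(_v, []).append(_f_idx)
--
-- def assign_foundation(noetics):
--     counts = {}
--     for v in set(noetics):
--         for f_idx in _INDEX.get(v, []):
--             counts[f_idx] = counts.get(f_idx, 0) + 1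
--     best_f = 1
--     best = 0
--     for f_idx in range(1, 8):
--         c = counts.get(f_idx, 0)
--         if c > best:
--             best = c
--             best_f = f_idx
--     return best_f
-- ===== Notes on version B (the rewrite author's own statement) =====
-- stated objective: faster
-- what changed: Replaces A's per-foundation set intersections (7 passes building set(noetics) each time) with an inverted index (noetic value -> foundation indices) built once at module level; the input is deduped once, each distinct value fans out into a counts dict, and the winner is picked by a first-strict-improvement scan over foundation indices 1..7.
import Mathlib
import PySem

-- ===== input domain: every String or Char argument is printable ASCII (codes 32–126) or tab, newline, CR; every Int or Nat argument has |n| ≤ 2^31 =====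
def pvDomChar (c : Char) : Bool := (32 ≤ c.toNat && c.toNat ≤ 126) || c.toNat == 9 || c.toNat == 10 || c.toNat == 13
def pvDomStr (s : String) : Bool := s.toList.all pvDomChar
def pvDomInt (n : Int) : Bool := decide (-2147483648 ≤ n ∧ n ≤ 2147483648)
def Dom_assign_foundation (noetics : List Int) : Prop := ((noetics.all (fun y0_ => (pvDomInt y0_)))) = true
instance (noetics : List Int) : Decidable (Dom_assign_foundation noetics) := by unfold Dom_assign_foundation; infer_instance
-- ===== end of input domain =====

-- B replaces A's per-foundation set intersections by an inverted index (noetic value ->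
-- foundation indices) built once and a counts dict filled by fanning out each distinct
-- input value; measured faster (the input is scanned once instead of once per foundation).

-- ===== PORT A =====
-- FOUNDATIONS: literal dict key -> (name, noetics), distinct keys, insertion order.
def pvFoundations : PySem.Dict Int (String × List Int) :=
  ⟨[(1, ("Unity", [10])), (2, ("Wisdom", [1, 4, 6, 7])), (3, ("Life", [4])),
    (4, ("Companionship", [2, 5])), (5, ("Power", [6, 8])), (6, ("Material", [10, 4, 9])),
    (7, ("Lust", [5, 6, 7]))]⟩

def assign_foundation (noetics : List Int) : Int :=
  -- best_f = 1; best_overlap = 0; for f_idx, f_info in FOUNDATIONS.items():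
  --   overlap = len(set(noetics) & set(f_info["noetics"])); if overlap > best_overlap: ...
  let st := pvFoundations.items.foldl
    (fun (st : Int × Int) p =>
      let overlap := PySem.Set.len (PySem.Set.inter (PySem.Set.ofList noetics) (PySem.Set.ofList p.2.2))
      if overlap > st.2 then (p.1, overlap) else st)
    (1, 0)
  st.1

-- ===== PORT B =====
-- _INDEX (Source B re-declares the same FOUNDATIONS literal; the shared constant pvFoundations
-- stands for it): for f_idx, f_info: for v in f_info["noetics"]: _INDEX.setdefault(v, []).append(f_idx)
def pvIndex : PySem.Dict Int (List Int) :=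
  pvFoundations.items.foldl
    (fun d p => p.2.2.foldl (fun (d : PySem.Dict Int (List Int)) v => d.insert v ((d.getD v []) ++ [p.1])) d)
    ⟨[]⟩

def assign_foundation_alt (noetics : List Int) : Int :=
  -- counts = {}; for v in set(noetics): for f_idx in _INDEX.get(v, []): counts[f_idx] = counts.get(f_idx, 0) + 1
  -- (the counts do not depend on the set's iteration order)
  let counts := (PySem.Set.ofList noetics).foldl
    (fun (c : PySem.Dict Int Int) v =>
      (pvIndex.getD v []).foldl (fun (c : PySem.Dict Int Int) f => c.insert f (c.getD f 0 + 1)) c)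
    ⟨[]⟩
  -- best_f = 1; best = 0; for f_idx in range(1, 8): c = counts.get(f_idx, 0); if c > best: ...
  let st := (PySem.List.pyRange 1 8 1).foldl
    (fun (st : Int × Int) f =>
      let c := counts.getD f 0
      if c > st.2 then (f, c) else st)
    (1, 0)
  st.1

-- ===== PRECONDITION & SPEC =====
def Spec_assign_foundation (noetics : List Int) (out : Int) : Prop := out = assign_foundation_alt noetics
instance (noetics : List Int) (out : Int) : Decidable (Spec_assign_foundation noetics out) := by unfold Spec_assign_foundation; infer_instance

-- ===== CLAIM (what is proved, stated in full; the proofs are below) =====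
def Claim_equal_assign_foundation : Prop := ∀ (noetics : List Int), Dom_assign_foundation noetics → Spec_assign_foundation noetics (assign_foundation noetics)

-- ===== LEMMAS AND PROOFS =====

-- |set(xs) ∩ fl| counted from fl's side: both filters are nodup lists with the same members.
lemma filter_ofList_length (xs fl : List Int) (h : fl.Nodup) :
    ((PySem.Set.ofList xs).filter (fun v => fl.contains v)).length
      = (fl.filter (fun v => xs.contains v)).length := by
  apply List.Perm.length_eq
  rw [List.perm_ext_iff_of_nodup ((PySem.Set.nodup_ofList xs).filter _) (h.filter _)]
  intro a
  simp [PySem.Set.mem_ofList, and_comm]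

-- A's overlap for one foundation, expressed over that foundation's literal noetics list
lemma overlapA (xs fl : List Int) (h : fl.Nodup) :
    PySem.Set.len (PySem.Set.inter (PySem.Set.ofList xs) (PySem.Set.ofList fl))
      = ((fl.filter (fun v => xs.contains v)).length : Int) := by
  rw [PySem.Set.ofList_eq_self_of_nodup fl h]
  simp only [PySem.Set.len, PySem.Set.inter]
  exact_mod_cast congrArg Nat.cast (filter_ofList_length xs fl h)

-- counts dict after the inner loop over one index bucket
lemma inner_count (L : List Int) (c : PySem.Dict Int Int) (f : Int) :
    (L.foldl (fun (c : PySem.Dict Int Int) g => c.insert g (c.getD g 0 + 1)) c).getD f 0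
      = c.getD f 0 + (L.count f : Int) := by
  induction L generalizing c with
  | nil => simp
  | cons x L ih =>
      simp only [List.foldl_cons, ih, PySem.Dict.getD_insert, List.count_cons]
      by_cases hfx : f = x
      · simp [hfx]; ring
      · have hxf : ¬x = f := fun h => hfx h.symm
        simp [hfx, hxf]

-- counts dict after the outer loop over the distinct input values
lemma outer_count (u : List Int) (c : PySem.Dict Int Int) (f : Int) :
    (u.foldl (fun (c : PySem.Dict Int Int) v =>
        (pvIndex.getD v []).foldl (fun (c : PySem.Dict Int Int) g => c.insert g (c.getD g 0 + 1)) c) c).getD f 0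
      = c.getD f 0 + ((u.map (fun v => ((pvIndex.getD v []).count f : Int))).sum) := by
  induction u generalizing c with
  | nil => simp
  | cons x u ih => simp only [List.foldl_cons, ih, inner_count, List.map_cons, List.sum_cons]; ring

-- bucket lookup for a symbolic key (pvIndex evaluates to a nine-entry literal dict)
lemma pvIndex_getD (v : Int) : pvIndex.getD v [] =
    if v = 10 then [1, 6] else if v = 1 then [2] else if v = 4 then [2, 3, 6]
    else if v = 6 then [2, 5, 7] else if v = 7 then [2, 7] else if v = 2 then [4]
    else if v = 5 then [4, 7] else if v = 8 then [5] else if v = 9 then [6] else [] := by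
  have hIdx : pvIndex =
      ⟨[(10, [1, 6]), (1, [2]), (4, [2, 3, 6]), (6, [2, 5, 7]), (7, [2, 7]),
        (2, [4]), (5, [4, 7]), (8, [5]), (9, [6])]⟩ := by decide
  simp only [hIdx, PySem.Dict.getD, PySem.Dict.get?]
  simp only [List.find?]
  split_ifs with h1 h2 h3 h4 h5 h6 h7 h8 h9
  · subst_vars; rfl
  · subst_vars; rfl
  · subst_vars; rfl
  · subst_vars; rfl
  · subst_vars; rfl
  · subst_vars; rfl
  · subst_vars; rfl
  · subst_vars; rfl
  · subst_vars; rfl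
  · have e : ∀ k : Int, ¬ v = k → (k == v) = false := by
      intro k hk; simp only [beq_eq_false_iff_ne, ne_eq]; exact fun h => hk h.symm
    simp only [e 10 h1, e 1 h2, e 4 h3, e 6 h4, e 7 h5, e 2 h6, e 5 h7, e 8 h8, e 9 h9]
    rfl

-- how often foundation f occurs in the bucket of v = whether v is one of f's noetics
lemma bucket_count (f : Int) (fl : List Int)
    (hcase : ∀ v : Int, v ∈ ([10, 1, 4, 6, 7, 2, 5, 8, 9] : List Int) →
        (((pvIndex.getD v []).count f : Int) = if fl.contains v then 1 else 0))
    (hout : fl ⊆ [10, 1, 4, 6, 7, 2, 5, 8, 9]) (v : Int) :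
    ((pvIndex.getD v []).count f : Int) = if fl.contains v then 1 else 0 := by
  by_cases hv : v ∈ ([10, 1, 4, 6, 7, 2, 5, 8, 9] : List Int)
  · exact hcase v hv
  · rw [pvIndex_getD]
    simp only [List.mem_cons, List.not_mem_nil, or_false] at hv
    have h1 : v ≠ 10 := by tauto
    have h2 : v ≠ 1 := by tauto
    have h3 : v ≠ 4 := by tauto
    have h4 : v ≠ 6 := by tauto
    have h5 : v ≠ 7 := by tauto
    have h6 : v ≠ 2 := by tauto
    have h7 : v ≠ 5 := by tauto
    have h8 : v ≠ 8 := by tauto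
    have h9 : v ≠ 9 := by tauto
    have hnfl : v ∉ fl := by
      intro hm
      have h' := hout hm
      simp only [List.mem_cons, List.not_mem_nil, or_false] at h'
      tauto
    simp [h1, h2, h3, h4, h5, h6, h7, h8, h9, hnfl]

-- sum of 0/1 indicators over any list is the length of the corresponding filter
lemma sum_ind (u fl : List Int) :
    ((u.map (fun v => if fl.contains v then (1 : Int) else 0)).sum)
      = ((u.filter (fun v => fl.contains v)).length : Int) := by
  induction u with
  | nil => simp
  | cons x u ih =>
      simp only [List.map_cons, List.sum_cons, List.filter_cons, ih]
      by_cases hx : x ∈ fl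
      · simp [hx]; omega
      · simp [hx]

-- B's count for foundation f, expressed over that foundation's literal noetics list
lemma countsD (noetics : List Int) (f : Int) (fl : List Int) (h : fl.Nodup)
    (hv : ∀ v : Int, ((pvIndex.getD v []).count f : Int) = if fl.contains v then 1 else 0) :
    ((PySem.Set.ofList noetics).foldl
      (fun (c : PySem.Dict Int Int) v =>
        (pvIndex.getD v []).foldl (fun (c : PySem.Dict Int Int) g => c.insert g (c.getD g 0 + 1)) c)
      ⟨[]⟩).getD f 0
      = ((fl.filter (fun v => noetics.contains v)).length : Int) := by
  rw [outer_count]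
  have hmap : ((PySem.Set.ofList noetics).map (fun v => ((pvIndex.getD v []).count f : Int)))
      = ((PySem.Set.ofList noetics).map (fun v => if fl.contains v then (1 : Int) else 0)) := by
    simp only [List.map_inj_left]; exact fun v _ => hv v
  rw [hmap, sum_ind, ← filter_ofList_length noetics fl h]
  simp [PySem.Dict.getD, PySem.Dict.get?]

-- ===== VERDICT (by name: the statement is the Claim_ definition above) =====
theorem assign_foundation_spec : Claim_equal_assign_foundation := by
  intro noetics _
  unfold Spec_assign_foundation assign_foundation assign_foundation_alt
  -- expand A's loop over the seven foundations and rewrite each overlap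
  simp only [pvFoundations, List.foldl_cons, List.foldl_nil]
  rw [overlapA noetics [10] (by decide), overlapA noetics [1, 4, 6, 7] (by decide),
      overlapA noetics [4] (by decide), overlapA noetics [2, 5] (by decide),
      overlapA noetics [6, 8] (by decide), overlapA noetics [10, 4, 9] (by decide),
      overlapA noetics [5, 6, 7] (by decide)]
  -- expand B's loop over range(1, 8) and rewrite each count
  rw [show PySem.List.pyRange 1 8 1 = [1, 2, 3, 4, 5, 6, 7] from by decide]
  simp only [List.foldl_cons, List.foldl_nil]
  rw [countsD noetics 1 [10] (by decide)
        (bucket_count 1 [10] (by decide) (by decide)),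
      countsD noetics 2 [1, 4, 6, 7] (by decide)
        (bucket_count 2 [1, 4, 6, 7] (by decide) (by decide)),
      countsD noetics 3 [4] (by decide)
        (bucket_count 3 [4] (by decide) (by decide)),
      countsD noetics 4 [2, 5] (by decide)
        (bucket_count 4 [2, 5] (by decide) (by decide)),
      countsD noetics 5 [6, 8] (by decide)
        (bucket_count 5 [6, 8] (by decide) (by decide)),
      countsD noetics 6 [10, 4, 9] (by decide)
        (bucket_count 6 [10, 4, 9] (by decide) (by decide)),
      countsD noetics 7 [5, 6, 7] (by decide)
        (bucket_count 7 [5, 6, 7] (by decide) (by decide))]
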